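-- pv_equiv track=rewrite | github.com/plesastapevka/solo-projects | python_projects/fruit_farmer/sadjar.py | other_it
-- ===== SOURCE A (Python) =====
-- def other_it(N, D, L, values, iteration):
--     max_found = 0
--     for i in range(N - 1, -1, -1):
--         if i + D < N:  # sum up current value and previous value D days ahead
--             currval = values[i] + L[i + D][iteration - 1]
--         else:
--             currval = values[i]
--         if currval > max_found:  # finding the best element
--             max_found = currval
--         L[i][iteration] = max_found
--     return L
-- ===== SOURCE B (Python) =====
-- def other_it(N, D, L, values, iteration):
--     # Divide-and-conquer decomposition: fill(lo, hi, right) fills column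
--     # `iteration` of rows [lo, hi) given `right`, the running max (floored
--     # at 0) over rows >= hi, and returns the running max over rows >= lo.
--     # A mutates L in place; B performs the same in-place writes.
--     def fill(lo, hi, right):
--         if hi - lo <= 0:
--             return right
--         if hi - lo == 1:
--             cur = (values[lo] + L[lo + D][iteration - 1]) if lo + D < N else values[lo]
--             best = cur if cur > right else right
--             L[lo][iteration] = best
--             return best
--         m = (lo + hi) // 2
--         r = fill(m, hi, right)
--         return fill(lo, m, r)
--     fill(0, N, 0)
--     return L
-- ===== Notes on version B (the rewrite author's own statement) =====
-- stated objective: alternative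
-- what changed: Replaces the backward accumulator for-loop with a divide-and-conquer recursion that fills the right half first and threads the running max (floored at 0) into the left half.
import Mathlib
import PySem

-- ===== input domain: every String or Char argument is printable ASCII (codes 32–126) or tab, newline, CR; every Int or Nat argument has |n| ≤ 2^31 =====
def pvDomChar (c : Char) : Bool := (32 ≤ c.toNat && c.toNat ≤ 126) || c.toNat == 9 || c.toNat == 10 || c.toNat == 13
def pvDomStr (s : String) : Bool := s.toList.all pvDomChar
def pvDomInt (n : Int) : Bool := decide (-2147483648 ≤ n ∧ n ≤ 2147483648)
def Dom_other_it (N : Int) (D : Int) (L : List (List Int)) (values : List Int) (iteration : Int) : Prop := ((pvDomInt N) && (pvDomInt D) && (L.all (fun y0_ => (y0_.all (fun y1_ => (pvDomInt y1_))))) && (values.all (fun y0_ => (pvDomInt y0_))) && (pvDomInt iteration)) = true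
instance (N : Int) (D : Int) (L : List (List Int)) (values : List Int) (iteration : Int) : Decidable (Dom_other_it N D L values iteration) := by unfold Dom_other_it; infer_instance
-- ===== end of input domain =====

-- B replaces A's backward accumulator loop by a divide-and-conquer recursion (same O(N) cost);
-- both Pythons mutate L in place identically, the equivalence proved here is about the returned value.

-- ===== PORT A =====
-- Port of A: one backward loop over range(N-1, -1, -1) carrying (L, max_found);
-- each step reads values[i] and L[i+D][iteration-1] from the CURRENT (partially
-- rewritten) L and writes L[i][iteration] := max_found.
def other_it (N : Int) (D : Int) (L : List (List Int)) (values : List Int) (iteration : Int) : List (List Int) :=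
  ((PySem.List.pyRange (N - 1) (-1) (-1)).foldl
    (fun (st : List (List Int) × Int) (i : Int) =>
      let currval : Int :=
        if i + D < N then
          PySem.List.pyGetD values i 0 +
            PySem.List.pyGetD (PySem.List.pyGetD st.1 (i + D) []) (iteration - 1) 0
        else
          PySem.List.pyGetD values i 0
      let max_found : Int := if currval > st.2 then currval else st.2
      (PySem.List.pySetD st.1 i
        (PySem.List.pySetD (PySem.List.pyGetD st.1 i []) iteration max_found), max_found))
    (L, 0)).1

-- ===== PORT B =====
-- Port of B's recursive fill(lo, hi, right): the mutated L is threaded as state M;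
-- the right half [m, hi) is filled first, its running max is passed into the left half.
def fillB (N : Int) (D : Int) (iteration : Int) (values : List Int)
    (lo : Int) (hi : Int) (right : Int) (M : List (List Int)) : List (List Int) × Int :=
  if hi - lo ≤ 0 then (M, right)
  else if hi - lo = 1 then
    let cur : Int :=
      if lo + D < N then
        PySem.List.pyGetD values lo 0 +
          PySem.List.pyGetD (PySem.List.pyGetD M (lo + D) []) (iteration - 1) 0
      else
        PySem.List.pyGetD values lo 0
    let best : Int := if cur > right then cur else right
    (PySem.List.pySetD M lo
      (PySem.List.pySetD (PySem.List.pyGetD M lo []) iteration best), best)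
  else
    let m : Int := PySem.Int.floordiv (lo + hi) 2
    let r : List (List Int) × Int := fillB N D iteration values m hi right M
    fillB N D iteration values lo m r.2 r.1
termination_by (hi - lo).toNat
decreasing_by
  · have hm := PySem.Int.floordiv_eq_ediv_of_pos (a := lo + hi) (b := 2) (by norm_num)
    simp only [hm]; omega
  · have hm := PySem.Int.floordiv_eq_ediv_of_pos (a := lo + hi) (b := 2) (by norm_num)
    simp only [hm]; omega

def other_it_alt (N : Int) (D : Int) (L : List (List Int)) (values : List Int) (iteration : Int) : List (List Int) :=
  (fillB N D iteration values 0 N 0 L).1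

-- ===== PRECONDITION & SPEC =====
-- rowIdx n i = the list position Python's (in-range) index i denotes in a list of length n
def rowIdx (n : Nat) (i : Int) : Nat := (if i < 0 then i + n else i).toNat

-- Pre_ excludes exactly the inputs on which Python A raises IndexError: every visited row
-- index must be a valid index of values and L, the written cell L[i][iteration] and (when
-- i + D < N) the read cell L[i+D][iteration-1] must exist.
def Pre_other_it (N : Int) (D : Int) (L : List (List Int)) (values : List Int) (iteration : Int) : Prop :=
  N.toNat ≤ values.length ∧ N.toNat ≤ L.length ∧
  ∀ j : Nat, j < N.toNat →
    PySem.Raise.InRange (L.getD j []).length iteration ∧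
    ((j : Int) + D < N →
      PySem.Raise.InRange L.length ((j : Int) + D) ∧
      PySem.Raise.InRange (L.getD (rowIdx L.length ((j : Int) + D)) []).length (iteration - 1))

instance (N : Int) (D : Int) (L : List (List Int)) (values : List Int) (iteration : Int) : Decidable (Pre_other_it N D L values iteration) := by unfold Pre_other_it; infer_instance

def pvWitness_other_it : Int × Int × List (List Int) × List Int × Int :=
  (2, 1, [[0, 0], [0, 0]], [3, 1], 1)

def Spec_other_it (N : Int) (D : Int) (L : List (List Int)) (values : List Int) (iteration : Int) (out : List (List Int)) : Prop := out = other_it_alt N D L values iteration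
instance (N : Int) (D : Int) (L : List (List Int)) (values : List Int) (iteration : Int) (out : List (List Int)) : Decidable (Spec_other_it N D L values iteration out) := by unfold Spec_other_it; infer_instance

-- ===== CLAIM (what is proved, stated in full; the proofs are below) =====
def Claim_equal_other_it : Prop := ∀ (N : Int) (D : Int) (L : List (List Int)) (values : List Int) (iteration : Int), Dom_other_it N D L values iteration → Pre_other_it N D L values iteration → Spec_other_it N D L values iteration (other_it N D L values iteration)

-- ===== LEMMAS AND PROOFS =====

theorem pvWitness_ok :
    Dom_other_it pvWitness_other_it.1 pvWitness_other_it.2.1 pvWitness_other_it.2.2.1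
      pvWitness_other_it.2.2.2.1 pvWitness_other_it.2.2.2.2 ∧
    Pre_other_it pvWitness_other_it.1 pvWitness_other_it.2.1 pvWitness_other_it.2.2.1
      pvWitness_other_it.2.2.2.1 pvWitness_other_it.2.2.2.2 := by decide

-- the shared per-row step (read currval, update the running max, write the cell)
def stepAB (N D iteration : Int) (values : List Int)
    (st : List (List Int) × Int) (i : Int) : List (List Int) × Int :=
  let currval : Int :=
    if i + D < N then
      PySem.List.pyGetD values i 0 +
        PySem.List.pyGetD (PySem.List.pyGetD st.1 (i + D) []) (iteration - 1) 0
    else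
      PySem.List.pyGetD values i 0
  let max_found : Int := if currval > st.2 then currval else st.2
  (PySem.List.pySetD st.1 i
    (PySem.List.pySetD (PySem.List.pyGetD st.1 i []) iteration max_found), max_found)

-- the descending index list [hi-1, hi-2, …, lo]
def dlist (lo hi : Int) : List Int := (List.range (hi - lo).toNat).map (fun (k : Nat) => hi - 1 - (k : Int))

theorem other_it_eq_fold (N D : Int) (L : List (List Int)) (values : List Int) (iteration : Int) :
    other_it N D L values iteration =
      ((PySem.List.pyRange (N - 1) (-1) (-1)).foldl (stepAB N D iteration values) (L, 0)).1 := rfl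

theorem pyRange_eq_dlist (N : Int) :
    PySem.List.pyRange (N - 1) (-1) (-1) = dlist 0 N := by
  rw [PySem.List.pyRange_neg_one, dlist, show N - 1 - -1 = N - 0 by omega]

theorem dlist_split (lo m hi : Int) (h1 : lo ≤ m) (h2 : m ≤ hi) :
    dlist lo hi = dlist m hi ++ dlist lo m := by
  have ha : (hi - lo).toNat = (hi - m).toNat + (m - lo).toNat := by omega
  rw [dlist, ha, List.range_add, List.map_append, List.map_map]
  congr 1
  rw [dlist]
  apply List.map_congr_left
  intro k hk
  simp only [List.mem_range] at hk
  simp only [Function.comp_apply]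
  push_cast
  omega

theorem fillB_eq_foldl (N D iteration : Int) (values : List Int) :
    ∀ (n : Nat) (lo hi : Int), (hi - lo).toNat ≤ n → ∀ (right : Int) (M : List (List Int)),
      fillB N D iteration values lo hi right M
        = (dlist lo hi).foldl (stepAB N D iteration values) (M, right) := by
  intro n
  induction n with
  | zero =>
    intro lo hi h right M
    rw [fillB, if_pos (by omega), dlist, show (hi - lo).toNat = 0 by omega]
    rfl
  | succ n ih =>
    intro lo hi h right M
    rw [fillB]
    by_cases h0 : hi - lo ≤ 0
    · rw [if_pos h0, dlist, show (hi - lo).toNat = 0 by omega]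
      rfl
    · rw [if_neg h0]
      by_cases h1 : hi - lo = 1
      · have hd : dlist lo hi = [lo] := by
          rw [dlist, show (hi - lo).toNat = 1 by omega]
          simp only [List.range_one, List.map_cons, List.map_nil, Nat.cast_zero, sub_zero]
          exact congrArg (· :: []) (by omega)
        rw [if_pos h1, hd]
        simp only [List.foldl_cons, List.foldl_nil]
        rfl
      · rw [if_neg h1]
        have hm := PySem.Int.floordiv_eq_ediv_of_pos (a := lo + hi) (b := 2) (by norm_num)
        have hb : lo + 1 ≤ PySem.Int.floordiv (lo + hi) 2 ∧
            PySem.Int.floordiv (lo + hi) 2 ≤ hi - 1 := by rw [hm]; omega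
        rw [ih _ _ (by omega), ih _ _ (by omega),
          dlist_split lo (PySem.Int.floordiv (lo + hi) 2) hi (by omega) (by omega),
          List.foldl_append]

-- ===== VERDICT (by name: the statement is the Claim_ definition above) =====
theorem other_it_spec : Claim_equal_other_it := by
  intro N D L values iteration _ _
  unfold Spec_other_it
  rw [other_it_eq_fold, pyRange_eq_dlist]
  unfold other_it_alt
  rw [fillB_eq_foldl N D iteration values (N - 0).toNat 0 N le_rfl 0 L]
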